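-- pv_equiv track=rewrite | github.com/qiqi-impact/cp | leetcode/439.py | parseTernary
-- ===== SOURCE A (Python) =====
-- def parseTernary(expression: str) -> str:
--     st = []
--
--     def ev():
--         e, _, c, _, a = st.pop(), st.pop(), st.pop(), st.pop(), st.pop()
--         if a == 'T':
--             st.append(c)
--         else:
--             st.append(e)
--
--     for c in expression:
--         if c in 'FT?':
--             st.append(c)
--         elif c == ':':
--             while st[-2] == ':':
--                 ev()
--             st.append(c)
--         else:
--             st.append(c)
--     while len(st) > 1:
--         ev()
--     return st[0]
-- ===== SOURCE B (Python) =====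
-- def parseTernary(expression: str) -> str:
--     st = []
--     for ch in reversed(expression):
--         if st and st[-1] == '?':
--             st[-4:] = [st[-2] if ch == 'T' else st[-4]]
--         else:
--             st.append(ch)
--     while len(st) > 1:
--         st[-5:] = [st[-3] if st[-1] == 'T' else st[-5]]
--     return st[0]
-- ===== Notes on version B (the rewrite author's own statement) =====
-- stated objective: alternative
-- what changed: B scans right-to-left keeping the stack in Python list order and collapses each complete ternary frame by slice assignment the moment its condition character arrives, then reduces the residue the same way; A scans left-to-right pushing every character, reducing 5-element frames in a ':'-triggered while-loop and a final drain loop.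
-- outside the precondition, e.g. on parseTernary('Tabcdefg1'): A returns 'b', B returns '1'; on parseTernary('TT?:F'): A returns '?', B raises IndexError; on parseTernary(':'): A raises IndexError, B returns ':'
import Mathlib
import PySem

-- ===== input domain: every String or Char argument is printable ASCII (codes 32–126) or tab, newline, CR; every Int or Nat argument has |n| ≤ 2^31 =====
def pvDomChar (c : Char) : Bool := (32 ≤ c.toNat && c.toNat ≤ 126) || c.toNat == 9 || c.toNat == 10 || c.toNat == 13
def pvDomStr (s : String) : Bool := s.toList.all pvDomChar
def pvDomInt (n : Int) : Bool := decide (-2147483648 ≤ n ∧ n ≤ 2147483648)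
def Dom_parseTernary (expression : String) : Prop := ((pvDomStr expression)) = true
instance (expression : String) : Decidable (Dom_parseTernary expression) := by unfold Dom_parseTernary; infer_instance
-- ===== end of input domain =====

-- B replaces A's left-to-right ':'-triggered stack reduction (push everything, reduce
-- 5-element frames on ':' and in a final drain) by a right-to-left scan that keeps the stack
-- in Python list order and collapses a ternary frame by slice assignment the moment its
-- condition character arrives; equivalence is proved on Pre_ (well-formed ternary
-- expressions, single characters, and operator-free strings on which both return the last
-- character).


-- ===== PORT A =====
-- A's inner `while st[-2] == ':': ev()` loop (stack is held head-first: head = Python st[-1]).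
-- When the second element is ':' but the stack is too short Python raises IndexError in ev();
-- that case (outside Pre_) falls through to the default arm.
def pvColonLoopA (st : List Char) : List Char :=
  match st with
  | e :: o :: c :: q :: a :: rest =>
      if o = ':' then pvColonLoopA ((if a = 'T' then c else e) :: rest)
      else e :: o :: c :: q :: a :: rest
  | st => st
termination_by st.length
decreasing_by simp

-- body of A's for-loop, branches in A's order
def pvStepA (st : List Char) (ch : Char) : List Char :=
  if ch = 'F' ∨ ch = 'T' ∨ ch = '?' then ch :: st
  else if ch = ':' then ':' :: pvColonLoopA st
  else ch :: st

-- A's final `while len(st) > 1: ev()`; 2 ≤ len < 5 is Python's IndexError (outside Pre_),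
-- handled by the default arm.
def pvFinalLoopA (st : List Char) : List Char :=
  match st with
  | e :: _ :: c :: _ :: a :: rest => pvFinalLoopA ((if a = 'T' then c else e) :: rest)
  | st => st
termination_by st.length
decreasing_by simp

def parseTernary (expression : String) : String :=
  match pvFinalLoopA (List.foldl pvStepA [] expression.toList) with
  | [r] => String.ofList [r]   -- return st[0]
  | _ => ""                -- Python raised IndexError (outside Pre_)

-- ===== PORT B =====
-- B keeps the stack in Python list order (index 0 first).  st[-k] is ported as (k-1) ×
-- dropLast then getLast? — exact: it is none exactly when Python's st[-k] raises IndexError —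
-- and the slice assignment st[-k:] = [v] as take (len - k) ++ [v], exact for every length
-- (Python clips the slice at the left end, as take does).  The none arms are Python's
-- IndexError (outside Pre_).

-- B's for-loop over reversed(expression)
def pvScanB : List Char → List Char → List Char
  | [], st => st
  | ch :: rev, st =>
      if st.getLast? = some '?' then       -- st and st[-1] == '?'
        match (if ch = 'T' then st.dropLast.getLast?
               else st.dropLast.dropLast.dropLast.getLast?) with
        | some v => pvScanB rev (st.take (st.length - 4) ++ [v])
        | none => []                       -- IndexError (outside Pre_)
      else pvScanB rev (st ++ [ch])

-- B's `while len(st) > 1` slice reduction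
def pvDrainB (st : List Char) : List Char :=
  if _h : 1 < st.length then
    match (if st.getLast? = some 'T' then st.dropLast.dropLast.getLast?
           else st.dropLast.dropLast.dropLast.dropLast.getLast?) with
    | some v => pvDrainB (st.take (st.length - 5) ++ [v])
    | none => []                           -- IndexError (outside Pre_)
  else st
termination_by st.length
decreasing_by simp [List.length_take]; omega

def parseTernary_alt (expression : String) : String :=
  match (pvDrainB (pvScanB expression.toList.reverse [])).head? with  -- return st[0]
  | some r => String.ofList [r]
  | none => ""             -- empty stack: Python's st[0] raises (outside Pre_)

-- ===== PRECONDITION & SPEC =====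
-- Pre_ admits the well-formed ternary expressions (the problem's guaranteed input shape:
-- values and '?'/':' alternate and the operators nest properly), every single character
-- except ':', and the operator-free strings (no ':' or '?', length ≡ 1 mod 4, no 'T' in a
-- deciding slot — the same slot set read once from each end, one reading per scan direction)
-- on which both programs return the last character.  It excludes the remaining malformed
-- strings, on which A mostly raises IndexError and otherwise returns a leftover element of
-- its partially-reduced stack that no one would specify (see cites); B itself raises on most
-- of them.
def pvIsVal (c : Char) : Bool := c ≠ '?' && c ≠ ':'

-- pvShape l k = true ⟺ l is a ':'-separated chain of k+1 well-formed ternary expressions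
def pvShape : List Char → Nat → Bool
  | [c], k => pvIsVal c && k == 0
  | c :: o :: rest, k =>
      pvIsVal c &&
        (if o = '?' then pvShape rest (k + 1)
         else if o = ':' then decide (0 < k) && pvShape rest (k - 1)
         else false)
  | [], _ => false

-- the chars 4, 8, 12, ... positions from the far end (A's deciding slots) are not 'T'
def pvTail (st : List Char) : Bool :=
  match st with
  | [_] => true
  | _ :: _ :: _ :: _ :: a :: rest => decide (a ≠ 'T') && pvTail (a :: rest)
  | _ => false
termination_by st.length
decreasing_by simp

-- the chars at positions 0, 4, 8, ... (B's deciding slots; the same set as pvTail's,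
-- enumerated from the front) are not 'T'
def pvHeadT (st : List Char) : Bool :=
  match st with
  | [_] => true
  | a :: _ :: _ :: _ :: rest => decide (a ≠ 'T') && pvHeadT rest
  | _ => false
termination_by st.length
decreasing_by simp; omega

-- a single character other than ':'
def pvLone (l : List Char) : Bool :=
  l.length == 1 && l.headD ':' != ':'

def pvJunk (l : List Char) : Bool :=
  l.all (fun c => decide (c ≠ ':') && decide (c ≠ '?')) && pvTail l.reverse && pvHeadT l

def Pre_parseTernary (expression : String) : Prop :=
  pvShape expression.toList 0 = true ∨ pvJunk expression.toList = true ∨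
    pvLone expression.toList = true

instance (expression : String) : Decidable (Pre_parseTernary expression) := by
  unfold Pre_parseTernary; infer_instance

def pvWitness_parseTernary : String := "T?T?1:2:3"

def Spec_parseTernary (expression : String) (out : String) : Prop := out = parseTernary_alt expression
instance (expression : String) (out : String) : Decidable (Spec_parseTernary expression out) := by unfold Spec_parseTernary; infer_instance

-- ===== CLAIM (what is proved, stated in full; the proofs are below) =====
def Claim_equal_parseTernary : Prop := ∀ (expression : String), Dom_parseTernary expression → Pre_parseTernary expression → Spec_parseTernary expression (parseTernary expression)

-- ===== LEMMAS AND PROOFS =====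

-- well-formed ternary expression trees
inductive PvExpr : Type
  | leaf : Char → PvExpr
  | node : Char → PvExpr → PvExpr → PvExpr

def pvSer : PvExpr → List Char
  | .leaf c => [c]
  | .node c t f => c :: '?' :: (pvSer t ++ ':' :: pvSer f)

def pvEval : PvExpr → Char
  | .leaf c => c
  | .node c t f => if c = 'T' then pvEval t else pvEval f

def pvWf : PvExpr → Prop
  | .leaf c => c ≠ '?' ∧ c ≠ ':'
  | .node c t f => (c ≠ '?' ∧ c ≠ ':') ∧ pvWf t ∧ pvWf f

-- the (head-first) stack segment A has built after scanning pvSer E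
def pvRes : PvExpr → List Char
  | .leaf c => [c]
  | .node c t f => pvRes f ++ [':', pvEval t, '?', c]

lemma pvEval_ne (E : PvExpr) (h : pvWf E) : pvEval E ≠ '?' ∧ pvEval E ≠ ':' := by
  induction E with
  | leaf c => exact h
  | node c t f iht ihf =>
      obtain ⟨_, ht, hf⟩ := h
      simp only [pvEval]
      split <;> [exact iht ht; exact ihf hf]

lemma pvColonLoopA_res (E : PvExpr) (ctx : List Char) :
    pvColonLoopA (pvRes E ++ ctx) = pvColonLoopA (pvEval E :: ctx) := by
  induction E generalizing ctx with
  | leaf c => rfl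
  | node c t f iht ihf =>
      have h1 : pvRes (.node c t f) ++ ctx
          = pvRes f ++ (':' :: pvEval t :: '?' :: c :: ctx) := by
        simp [pvRes]
      rw [h1, ihf]
      show pvColonLoopA (pvEval f :: ':' :: pvEval t :: '?' :: c :: ctx) = _
      rw [pvColonLoopA]
      simp only [if_true]
      have : (if c = 'T' then pvEval t else pvEval f) = pvEval (.node c t f) := by
        simp [pvEval]
      rw [this]

lemma pvColonLoopA_stop (x : Char) (rest : List Char) :
    pvColonLoopA (x :: '?' :: rest) = x :: '?' :: rest := by
  match rest with
  | [] => simp [pvColonLoopA]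
  | [a] => simp [pvColonLoopA]
  | [a, b] => simp [pvColonLoopA]
  | a :: b :: r :: rs => rw [pvColonLoopA]; simp

lemma pvStepA_val (st : List Char) (ch : Char) (h : ch ≠ ':') :
    pvStepA st ch = ch :: st := by
  simp [pvStepA, h]

lemma pvFoldlA (E : PvExpr) (h : pvWf E) (st : List Char) :
    List.foldl pvStepA st (pvSer E) = pvRes E ++ st := by
  induction E generalizing st with
  | leaf c => simp [pvSer, pvRes, pvStepA_val st c h.2]
  | node c t f iht ihf =>
      obtain ⟨⟨_, hc⟩, ht, hf⟩ := h
      simp only [pvSer, List.foldl_cons]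
      rw [pvStepA_val st c hc]
      have h2 : pvStepA (c :: st) '?' = '?' :: c :: st := by simp [pvStepA]
      rw [h2, List.foldl_append, iht ht]
      simp only [List.foldl_cons]
      have h3 : pvStepA (pvRes t ++ '?' :: c :: st) ':'
          = ':' :: pvEval t :: '?' :: c :: st := by
        simp only [pvStepA, Char.reduceEq, or_self, if_false, if_true]
        rw [pvColonLoopA_res, pvColonLoopA_stop]
      rw [h3, ihf hf]
      simp [pvRes]

lemma pvFinalLoopA_res (E : PvExpr) (ctx : List Char) :
    pvFinalLoopA (pvRes E ++ ctx) = pvFinalLoopA (pvEval E :: ctx) := by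
  induction E generalizing ctx with
  | leaf c => rfl
  | node c t f iht ihf =>
      have h1 : pvRes (.node c t f) ++ ctx
          = pvRes f ++ (':' :: pvEval t :: '?' :: c :: ctx) := by
        simp [pvRes]
      rw [h1, ihf]
      show pvFinalLoopA (pvEval f :: ':' :: pvEval t :: '?' :: c :: ctx) = _
      rw [pvFinalLoopA]
      have : (if c = 'T' then pvEval t else pvEval f) = pvEval (.node c t f) := by
        simp [pvEval]
      rw [this]

-- small-step equations of B's scan
lemma pvScanB_push1 (ch : Char) (rev st : List Char) (h : st.getLast? ≠ some '?') :
    pvScanB (ch :: rev) st = pvScanB rev (st ++ [ch]) := by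
  rw [pvScanB, if_neg h]

lemma pvScanB_collapse (ch : Char) (rev pre : List Char) (f t : Char) :
    pvScanB (ch :: rev) (pre ++ [f, ':', t, '?'])
      = pvScanB rev (pre ++ [if ch = 'T' then t else f]) := by
  have h4 : pre ++ [f, ':', t, '?'] = (pre ++ [f, ':', t]) ++ ['?'] := by simp
  have h3 : pre ++ [f, ':', t] = (pre ++ [f, ':']) ++ [t] := by simp
  have h2 : pre ++ [f, ':'] = (pre ++ [f]) ++ [':'] := by simp
  rw [pvScanB]
  rw [show (pre ++ [f, ':', t, '?']).getLast? = some '?' by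
    rw [h4, List.getLast?_concat]]
  simp only [if_true]
  rw [show (pre ++ [f, ':', t, '?']).dropLast = pre ++ [f, ':', t] by
    rw [h4, List.dropLast_concat]]
  rw [show (pre ++ [f, ':', t]).dropLast = pre ++ [f, ':'] by
    rw [h3, List.dropLast_concat]]
  rw [show (pre ++ [f, ':']).dropLast = pre ++ [f] by
    rw [h2, List.dropLast_concat]]
  rw [show (pre ++ [f, ':', t]).getLast? = some t by rw [h3, List.getLast?_concat]]
  rw [show (pre ++ [f]).getLast? = some f by rw [List.getLast?_concat]]
  rw [show (if ch = 'T' then some t else some f) = some (if ch = 'T' then t else f) by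
    split <;> rfl]
  rw [show (pre ++ [f, ':', t, '?']).take ((pre ++ [f, ':', t, '?']).length - 4) = pre by
    rw [List.take_left']; simp]

-- B consumes a reversed well-formed expression in one run, appending its value
lemma pvScanB_ser (E : PvExpr) (h : pvWf E) (rev st : List Char)
    (hst : st.getLast? ≠ some '?') :
    pvScanB ((pvSer E).reverse ++ rev) st = pvScanB rev (st ++ [pvEval E]) := by
  induction E generalizing rev st with
  | leaf c =>
      simp only [pvSer, pvEval, List.reverse_singleton, List.singleton_append]
      exact pvScanB_push1 c rev st hst
  | node c t f iht ihf =>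
      obtain ⟨⟨_, _⟩, ht, hf⟩ := h
      have h1 : (pvSer (.node c t f)).reverse ++ rev
          = (pvSer f).reverse ++ (':' :: ((pvSer t).reverse ++ ('?' :: c :: rev))) := by
        simp [pvSer]
      rw [h1, ihf hf _ _ hst]
      rw [pvScanB_push1 ':' _ _ (by
        rw [List.getLast?_concat]; simpa using (pvEval_ne f hf).1)]
      rw [show st ++ [pvEval f] ++ [':'] = st ++ [pvEval f, ':'] by simp]
      rw [iht ht _ _ (by
        rw [show st ++ [pvEval f, ':'] = (st ++ [pvEval f]) ++ [':'] by simp,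
          List.getLast?_concat]; simp)]
      rw [pvScanB_push1 '?' _ _ (by
        rw [show st ++ [pvEval f, ':'] ++ [pvEval t] = (st ++ [pvEval f, ':']) ++ [pvEval t] by simp,
          List.getLast?_concat]; simpa using (pvEval_ne t ht).1)]
      rw [show st ++ [pvEval f, ':'] ++ [pvEval t] ++ ['?'] = st ++ [pvEval f, ':', pvEval t, '?'] by simp]
      rw [pvScanB_collapse c rev st (pvEval f) (pvEval t)]
      simp [pvEval]

-- on '?'-free characters B's scan only appends
lemma pvScanB_pushAll (l : List Char) (hl : ∀ c ∈ l, c ≠ '?') :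
    ∀ st, st.getLast? ≠ some '?' → pvScanB l st = st ++ l := by
  induction l with
  | nil => intro st _; simp [pvScanB]
  | cons c l' ih =>
      intro st hst
      rw [pvScanB_push1 c l' st hst]
      rw [ih (fun d hd => hl d (by simp [hd])) (st ++ [c]) (by
        rw [List.getLast?_concat]; simpa using hl c (by simp))]
      simp

-- l is a ':'-separated chain of k+1 well-formed expressions
inductive PvChain : List Char → Nat → Prop
  | base {E : PvExpr} : pvWf E → PvChain (pvSer E) 0
  | cons {E : PvExpr} {l : List Char} {k : Nat} :
      pvWf E → PvChain l k → PvChain (pvSer E ++ ':' :: l) (k + 1)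

lemma pvChain_node (c : Char) (hc : c ≠ '?' ∧ c ≠ ':') {l : List Char} {k : Nat}
    (h : PvChain l (k + 1)) : PvChain (c :: '?' :: l) k := by
  cases h with
  | cons hE1 htail =>
    rename_i E1 l'
    cases htail with
    | base hE2 =>
      rename_i E2
      exact PvChain.base (E := .node c E1 E2) ⟨hc, hE1, hE2⟩
    | cons hE2 htail' =>
      rename_i E2 l'' k'
      have heq : c :: '?' :: (pvSer E1 ++ ':' :: (pvSer E2 ++ ':' :: l''))
          = pvSer (.node c E1 E2) ++ ':' :: l'' := by
        simp [pvSer]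
      rw [heq]
      exact PvChain.cons ⟨hc, hE1, hE2⟩ htail'

lemma pvShape_chain : ∀ (l : List Char) (k : Nat), pvShape l k = true → PvChain l k := by
  intro l k h
  fun_induction pvShape l k with
  | case1 c k =>
      simp only [Bool.and_eq_true, beq_iff_eq] at h
      obtain ⟨hv, hk⟩ := h
      subst hk
      have : (c ≠ '?' ∧ c ≠ ':') := by
        simpa [pvIsVal, Bool.and_eq_true, decide_eq_true_eq] using hv
      exact PvChain.base (E := .leaf c) this
  | case2 c o rest k ihq ihc =>
      simp only [Bool.and_eq_true] at h
      obtain ⟨hv, hrest⟩ := h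
      have hcv : (c ≠ '?' ∧ c ≠ ':') := by
        simpa [pvIsVal, Bool.and_eq_true, decide_eq_true_eq] using hv
      split at hrest
      · rename_i ho; subst ho
        exact pvChain_node c hcv (ihq hrest)
      · split at hrest
        · rename_i ho; subst ho
          simp only [Bool.and_eq_true, decide_eq_true_eq] at hrest
          obtain ⟨hk, hrest⟩ := hrest
          have := PvChain.cons (E := .leaf c) hcv (ihc hrest)
          simpa [pvSer, Nat.sub_add_cancel hk] using this
        · exact absurd hrest (by simp)
  | case3 => exact absurd h (by simp)

lemma pvPre_ser (l : List Char) (h : pvShape l 0 = true) :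
    ∃ E, pvWf E ∧ l = pvSer E := by
  rcases pvShape_chain l 0 h with ⟨hE⟩ | _
  · rename_i E; exact ⟨E, hE, rfl⟩

lemma pvTail_head (x y : Char) (r : List Char) : pvTail (x :: r) = pvTail (y :: r) := by
  match r with
  | [] => simp [pvTail]
  | [b] => simp [pvTail]
  | [b, c] => simp [pvTail]
  | [b, c, d] => simp [pvTail]
  | b :: c :: d :: a :: rest => rw [pvTail, pvTail]

lemma pvJunkFinal : ∀ (n : Nat) (st : List Char), st.length ≤ n → pvTail st = true →
    pvFinalLoopA st = [st.headD ' '] := by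
  intro n
  induction n with
  | zero =>
      intro st hlen htail
      match st with
      | [] => simp [pvTail] at htail
      | c :: r => simp at hlen
  | succ n ih =>
      intro st hlen htail
      match st with
      | [] => simp [pvTail] at htail
      | [x] => simp [pvFinalLoopA]
      | [x, b] => simp [pvTail] at htail
      | [x, b, c] => simp [pvTail] at htail
      | [x, b, c, d] => simp [pvTail] at htail
      | x :: b :: c :: d :: a :: rest =>
          rw [pvTail] at htail
          simp only [Bool.and_eq_true, decide_eq_true_eq] at htail
          obtain ⟨ha, ht⟩ := htail
          rw [pvFinalLoopA, if_neg ha]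
          have h1 : pvTail (x :: rest) = true := by rw [pvTail_head x a]; exact ht
          have h2 := ih (x :: rest) (by simp at hlen ⊢; omega) h1
          simpa using h2

lemma pvFoldlA_push (l : List Char) (h : ∀ c ∈ l, c ≠ ':') :
    ∀ st, List.foldl pvStepA st l = l.reverse ++ st := by
  induction l with
  | nil => simp
  | cons c l' ih =>
      intro st
      simp only [List.foldl_cons]
      rw [pvStepA_val st c (h c (by simp)), ih (fun c hc => h c (by simp [hc]))]
      simp

-- B's drain on a stack whose head-first reading rs has no 'T' in a deciding slot
-- returns the bottom element (rs.getLast)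
lemma pvDrainB_rev : ∀ (n : Nat) (rs : List Char), rs.length ≤ n → pvHeadT rs = true →
    pvDrainB rs.reverse = [rs.getLastD ' '] := by
  intro n
  induction n with
  | zero =>
      intro rs hlen hh
      match rs with
      | [] => simp [pvHeadT] at hh
      | c :: r => simp at hlen
  | succ n ih =>
      intro rs hlen hh
      match rs with
      | [] => simp [pvHeadT] at hh
      | [x] => rw [pvDrainB]; simp
      | [a, b] => simp [pvHeadT] at hh
      | [a, b, c] => simp [pvHeadT] at hh
      | [a, b, c, d] => simp [pvHeadT] at hh
      | a :: x :: t :: y :: rest =>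
          rw [pvHeadT] at hh
          simp only [Bool.and_eq_true, decide_eq_true_eq] at hh
          obtain ⟨ha, hh⟩ := hh
          match rest, hh with
          | [], hh => simp [pvHeadT] at hh
          | h0 :: rest', hh =>
          have hrw : (a :: x :: t :: y :: h0 :: rest').reverse
              = rest'.reverse ++ [h0, y, t, x, a] := by simp
          rw [hrw, pvDrainB]
          rw [dif_pos (by simp)]
          rw [show (rest'.reverse ++ [h0, y, t, x, a]).getLast? = some a by
            rw [show rest'.reverse ++ [h0, y, t, x, a]
              = (rest'.reverse ++ [h0, y, t, x]) ++ [a] by simp, List.getLast?_concat]]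
          rw [if_neg (by simpa using ha)]
          rw [show (rest'.reverse ++ [h0, y, t, x, a]).dropLast
              = rest'.reverse ++ [h0, y, t, x] by
            rw [show rest'.reverse ++ [h0, y, t, x, a]
              = (rest'.reverse ++ [h0, y, t, x]) ++ [a] by simp, List.dropLast_concat]]
          rw [show (rest'.reverse ++ [h0, y, t, x]).dropLast = rest'.reverse ++ [h0, y, t] by
            rw [show rest'.reverse ++ [h0, y, t, x]
              = (rest'.reverse ++ [h0, y, t]) ++ [x] by simp, List.dropLast_concat]]
          rw [show (rest'.reverse ++ [h0, y, t]).dropLast = rest'.reverse ++ [h0, y] by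
            rw [show rest'.reverse ++ [h0, y, t]
              = (rest'.reverse ++ [h0, y]) ++ [t] by simp, List.dropLast_concat]]
          rw [show (rest'.reverse ++ [h0, y]).dropLast = rest'.reverse ++ [h0] by
            rw [show rest'.reverse ++ [h0, y]
              = (rest'.reverse ++ [h0]) ++ [y] by simp, List.dropLast_concat]]
          rw [show (rest'.reverse ++ [h0]).getLast? = some h0 by rw [List.getLast?_concat]]
          rw [show (rest'.reverse ++ [h0, y, t, x, a]).take
                ((rest'.reverse ++ [h0, y, t, x, a]).length - 5) = rest'.reverse by
            rw [List.take_left']; simp]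
          show pvDrainB (rest'.reverse ++ [h0]) = _
          rw [show rest'.reverse ++ [h0] = (h0 :: rest').reverse by simp]
          rw [ih (h0 :: rest') (by simp at hlen ⊢; omega) hh]
          have : (a :: x :: t :: y :: h0 :: rest').getLastD ' '
              = (h0 :: rest').getLastD ' ' := by
            simp [List.getLastD_eq_getLast?]
          rw [this]

lemma pvLone_spec (l : List Char) (h : pvLone l = true) : ∃ c, l = [c] ∧ c ≠ ':' := by
  match l with
  | [] => simp [pvLone] at h
  | [c] => exact ⟨c, rfl, by simpa [pvLone] using h⟩
  | a :: b :: r => simp [pvLone] at h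

-- ===== VERDICT (by name: the statement is the Claim_ definition above) =====
theorem parseTernary_spec : Claim_equal_parseTernary := by
  intro expression _ hpre
  unfold Spec_parseTernary parseTernary parseTernary_alt
  rcases hpre with hpre | hjunk | hlone
  · obtain ⟨E, hwf, hser⟩ := pvPre_ser _ hpre
    rw [hser]
    rw [show List.foldl pvStepA [] (pvSer E) = pvRes E ++ [] from pvFoldlA E hwf []]
    rw [pvFinalLoopA_res E []]
    rw [show pvFinalLoopA [pvEval E] = [pvEval E] by simp [pvFinalLoopA]]
    rw [show (pvSer E).reverse = (pvSer E).reverse ++ [] by simp,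
      pvScanB_ser E hwf [] [] (by simp)]
    rw [show pvScanB [] ([] ++ [pvEval E]) = [pvEval E] from rfl]
    rw [show pvDrainB [pvEval E] = [pvEval E] by rw [pvDrainB]; simp]
    rfl
  · simp only [pvJunk, Bool.and_eq_true, List.all_eq_true, decide_eq_true_eq] at hjunk
    obtain ⟨⟨hall, htail⟩, hhead⟩ := hjunk
    rw [pvFoldlA_push _ (fun c hc => (hall c hc).1) [], List.append_nil]
    rw [pvJunkFinal expression.toList.reverse.length _ le_rfl htail]
    rw [pvScanB_pushAll _ (fun c hc => (hall c (by simpa using hc)).2) [] (by simp),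
      List.nil_append]
    rw [pvDrainB_rev expression.toList.length _ le_rfl hhead]
    simp [List.getLastD_eq_getLast?, ← List.head?_reverse]
  · obtain ⟨c, hc, hcne⟩ := pvLone_spec _ hlone
    rw [hc]
    rw [show List.foldl pvStepA [] [c] = [c] by
      simp [List.foldl, pvStepA_val [] c hcne]]
    rw [show pvFinalLoopA [c] = [c] by simp [pvFinalLoopA]]
    rw [show pvScanB [c].reverse [] = [c] by
      rw [List.reverse_singleton, pvScanB_push1 c [] [] (by simp)]; rfl]
    rw [show pvDrainB [c] = [c] by rw [pvDrainB]; simp]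
    simp
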